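-- pv_equiv track=rewrite | github.com/fanghaoZZ/bianyiyuanli | bianyiyuanli3/main.py | clean_direct_recursion
-- ===== SOURCE A (Python) =====
-- import copy
--
-- def clean_direct_recursion(ch_i, grammer, new_vn):
--     ch = ch_i + "'"
--     flag = 0
--     rules = copy.deepcopy(grammer)
--
--     for key in grammer.keys():
--         for item_i in grammer[key]:
--             if ch_i == key and ch_i == item_i[0]:
--                 flag = 1
--                 # 添加新非终结符
--                 if ch not in rules.keys():
--                     rules[ch] = []
--                 rules[ch].append(item_i[1:] + ch)
--                 rules[key].remove(item_i)
--
--     # 不存在左递归，直接返回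
--     if flag == 0:
--         return rules, new_vn
--
--     # 处理剩余的产生式
--     for key in grammer.keys():
--         for item_i in grammer[key]:
--             if ch_i == key and ch_i != item_i[0]:
--                 if ch not in rules.keys():
--                     rules[ch] = []
--                 rules[ch_i].append(item_i + ch)
--                 rules[key].remove(item_i)
--
--     # 添加新非终结符空串产生式
--     rules[ch].append('ε')
--     new_vn.append(ch)
--
--     return rules, new_vn
-- ===== SOURCE B (Python) =====
-- import copy
--
-- def clean_direct_recursion(ch_i, grammer, new_vn):
--     # Partition-based rewrite: split A -> A a | b into A -> b A', A' -> a A' | eps.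
--     rules = copy.deepcopy(grammer)
--     prods = grammer.get(ch_i)
--     if prods is None:
--         return rules, new_vn
--     recursive = [p for p in prods if ch_i == p[0]]
--     if not recursive:
--         return rules, new_vn
--     non_recursive = [p for p in prods if ch_i != p[0]]
--     ch = ch_i + "'"
--     rules.setdefault(ch, [])
--     rules[ch] = rules[ch] + [p[1:] + ch for p in recursive] + ['ε']
--     rules[ch_i] = [p + ch for p in non_recursive]
--     new_vn.append(ch)
--     return rules, new_vn
-- ===== Notes on version B (the rewrite author's own statement) =====
-- stated objective: simpler
-- what changed: A makes two full passes over every key of the dict, mutating rules in place with repeated list.remove calls and a flag; B looks up ch_i once, partitions its productions into recursive/non-recursive with two comprehensions, and rebuilds the two affected entries with bulk list operations.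
import Mathlib
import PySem

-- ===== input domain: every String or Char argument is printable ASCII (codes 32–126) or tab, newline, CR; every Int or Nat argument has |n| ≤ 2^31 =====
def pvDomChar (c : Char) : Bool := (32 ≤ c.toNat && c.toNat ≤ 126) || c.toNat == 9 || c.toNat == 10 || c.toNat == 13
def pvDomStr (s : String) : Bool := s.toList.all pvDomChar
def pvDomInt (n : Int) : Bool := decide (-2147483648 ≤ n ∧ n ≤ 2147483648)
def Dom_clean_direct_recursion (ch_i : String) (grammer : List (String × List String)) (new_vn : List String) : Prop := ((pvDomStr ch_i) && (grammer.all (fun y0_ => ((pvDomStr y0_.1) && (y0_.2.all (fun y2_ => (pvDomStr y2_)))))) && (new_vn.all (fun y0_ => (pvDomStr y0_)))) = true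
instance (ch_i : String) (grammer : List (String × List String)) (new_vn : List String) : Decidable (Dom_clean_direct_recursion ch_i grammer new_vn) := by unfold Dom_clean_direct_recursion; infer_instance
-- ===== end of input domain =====

-- B replaces A's two remove-one-by-one passes over every key of the dict by a single partition of
-- ch_i's productions (recursive / non-recursive) followed by two bulk updates; return-value
-- equivalence: both A and B also append ch_i+"'" to new_vn in place (the same observable mutation).

-- ===== PORT A =====
-- ch_i == item[0]  (item[0] on an empty item is an IndexError in Python — excluded by Pre_;
-- the helper returns false there, a value the claim never relies on)
def pvFirstCharEq (ch_i item : String) : Bool :=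
  match PySem.Str.pyGet? item 0 with
  | some c => ch_i == String.ofList [c]
  | none => false

-- rules[key].remove(item): the item was iterated from the very list being edited, so the
-- ValueError (none) branch of remove? is unreachable; the list is kept unchanged there
def pvRm (l : List String) (x : String) : List String := (PySem.List.remove? l x).getD l

-- body of A's first nested loop (state: (rules, flag))
def pvBody1 (ch_i ch key : String) (st : PySem.Dict String (List String) × Int) (item : String) :
    PySem.Dict String (List String) × Int :=
  if ch_i == key && pvFirstCharEq ch_i item then
    let rules := st.1
    let rules := if rules.contains ch then rules else rules.insert ch []
    let rules := rules.modify ch [] (fun l => l ++ [PySem.Str.slice item (some 1) none ++ ch])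
    let rules := rules.modify key [] (fun l => pvRm l item)
    (rules, 1)
  else st

-- body of A's second nested loop
def pvBody2 (ch_i ch key : String) (rules : PySem.Dict String (List String)) (item : String) :
    PySem.Dict String (List String) :=
  if ch_i == key && !pvFirstCharEq ch_i item then
    let rules := if rules.contains ch then rules else rules.insert ch []
    let rules := rules.modify ch_i [] (fun l => l ++ [item ++ ch])
    rules.modify key [] (fun l => pvRm l item)
  else rules

def clean_direct_recursion (ch_i : String) (grammer : List (String × List String)) (new_vn : List String) : (List (String × List String)) × List String :=
  let g : PySem.Dict String (List String) := ⟨grammer⟩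
  let ch : String := ch_i ++ "'"
  let st := g.keys.foldl (fun st key => (g.getD key []).foldl (pvBody1 ch_i ch key) st) (g, (0 : Int))
  if st.2 == 0 then (st.1.items, new_vn)
  else
    let rules := g.keys.foldl (fun rules key => (g.getD key []).foldl (pvBody2 ch_i ch key) rules) st.1
    let rules := rules.modify ch [] (fun l => l ++ ["ε"])
    (rules.items, new_vn ++ [ch])

-- ===== PORT B =====
def clean_direct_recursion_alt (ch_i : String) (grammer : List (String × List String)) (new_vn : List String) : (List (String × List String)) × List String :=
  let rules : PySem.Dict String (List String) := ⟨grammer⟩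
  match rules.get? ch_i with
  | none => (grammer, new_vn)
  | some prods =>
    let recursive := prods.filter (fun p => pvFirstCharEq ch_i p)
    if recursive.isEmpty then (grammer, new_vn)
    else
      let non_recursive := prods.filter (fun p => !pvFirstCharEq ch_i p)
      let ch := ch_i ++ "'"
      let rules := rules.setdefault ch []
      let rules := rules.insert ch (rules.getD ch [] ++ recursive.map (fun p => PySem.Str.slice p (some 1) none ++ ch) ++ ["ε"])
      let rules := rules.insert ch_i (non_recursive.map (fun p => p ++ ch))
      (rules.items, new_vn ++ [ch])

-- ===== PRECONDITION & SPEC =====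
-- Pre_ requires (i) unique keys — grammer stands for a Python dict, which cannot repeat keys, and
-- (ii) no empty production under key ch_i — there A evaluates item[0] and raises IndexError.
def Pre_clean_direct_recursion (ch_i : String) (grammer : List (String × List String)) (new_vn : List String) : Prop :=
  (grammer.map Prod.fst).Nodup ∧ ∀ p ∈ grammer, p.1 = ch_i → "" ∉ p.2
instance (ch_i : String) (grammer : List (String × List String)) (new_vn : List String) : Decidable (Pre_clean_direct_recursion ch_i grammer new_vn) := by unfold Pre_clean_direct_recursion; infer_instance

def pvWitness_clean_direct_recursion : String × (List (String × List String)) × List String :=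
  ("E", [("E", ["Ea", "b"]), ("T", ["a"])], ["E", "T"])

def Spec_clean_direct_recursion (ch_i : String) (grammer : List (String × List String)) (new_vn : List String) (out : (List (String × List String)) × List String) : Prop := out = clean_direct_recursion_alt ch_i grammer new_vn
instance (ch_i : String) (grammer : List (String × List String)) (new_vn : List String) (out : (List (String × List String)) × List String) : Decidable (Spec_clean_direct_recursion ch_i grammer new_vn out) := by unfold Spec_clean_direct_recursion; infer_instance

-- ===== CLAIM (what is proved, stated in full; the proofs are below) =====
def Claim_equal_clean_direct_recursion : Prop := ∀ (ch_i : String) (grammer : List (String × List String)) (new_vn : List String), Dom_clean_direct_recursion ch_i grammer new_vn → Pre_clean_direct_recursion ch_i grammer new_vn → Spec_clean_direct_recursion ch_i grammer new_vn (clean_direct_recursion ch_i grammer new_vn)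

-- ===== LEMMAS AND PROOFS =====


-- A's and B's dicts after the rewrite are both instances of this normal form: the original dict,
-- ch defaulted in, then the entries at ch and ch_i overwritten.
def pvNF (d : PySem.Dict String (List String)) (ch ch_i : String) (cl rl : List String) : PySem.Dict String (List String) :=
  ((d.setdefault ch []).insert ch cl).insert ch_i rl

lemma pv_append_quote_ne (s : String) : s ++ "'" ≠ s := by
  intro h
  have := congrArg String.length h
  simp [String.length_append] at this

lemma pv_rm_cons_of_ne {x y : String} (l : List String) (h : x ≠ y) :
    pvRm (x :: l) y = x :: pvRm l y := by
  unfold pvRm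
  rw [PySem.List.remove?_cons_of_ne l h]
  cases h' : PySem.List.remove? l y <;> simp [h']

lemma pv_foldl_rm_skip (P : String → Bool) (x : String) (hx : P x = false) :
    ∀ (ys acc : List String), (∀ y ∈ ys, P y = true) →
      ys.foldl pvRm (x :: acc) = x :: ys.foldl pvRm acc := by
  intro ys
  induction ys with
  | nil => intro acc _; simp
  | cons y t ih =>
    intro acc hall
    have hy : P y = true := hall y (by simp)
    have hxy : x ≠ y := by
      intro h; rw [h, hy] at hx; simp at hx
    simp only [List.foldl_cons]
    rw [pv_rm_cons_of_ne _ hxy]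
    exact ih (pvRm acc y) (fun z hz => hall z (List.mem_cons_of_mem _ hz))

-- removing, in iteration order, every P-element of l from (a copy of) l leaves the non-P elements
lemma pv_foldl_rm_filter (P : String → Bool) :
    ∀ l : List String, (l.filter P).foldl pvRm l = l.filter (fun x => !P x) := by
  intro l
  induction l with
  | nil => simp
  | cons x t ih =>
    by_cases hx : P x = true
    · have h1 : pvRm (x :: t) x = t := by unfold pvRm; simp
      simp only [List.filter_cons, hx, if_pos, List.foldl_cons, h1, ih]
      simp [hx]
    · have hx' : P x = false := by simpa using hx
      rw [List.filter_cons_of_neg (by simp [hx'])]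
      rw [pv_foldl_rm_skip P x hx' _ t (fun y hy => (List.mem_filter.mp hy).2), ih]
      simp [List.filter_cons, hx']

-- second pass on the ch_i entry: append item+ch then remove item, over the whole list
lemma pv_foldl_rm_append (ch : String) :
    ∀ (ns done : List String),
      ns.foldl (fun l x => pvRm (l ++ [x ++ ch]) x) (ns ++ done) = done ++ ns.map (· ++ ch) := by
  intro ns
  induction ns with
  | nil => intro done; simp
  | cons x rest ih =>
    intro done
    simp only [List.foldl_cons, List.cons_append]
    have h1 : pvRm (x :: (rest ++ done ++ [x ++ ch])) x = rest ++ (done ++ [x ++ ch]) := by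
      unfold pvRm
      rw [PySem.List.remove?_cons_self]
      simp [List.append_assoc]
    rw [h1, ih (done ++ [x ++ ch])]
    simp [List.append_assoc]

-- overwrite-inserts at two distinct, already-present keys commute
lemma pv_insert_comm {κ ν : Type} [BEq κ] [LawfulBEq κ] (d : PySem.Dict κ ν) (k k' : κ) (v v' : ν)
    (hne : k ≠ k') (hk : d.contains k = true) (hk' : d.contains k' = true) :
    (d.insert k v).insert k' v' = (d.insert k' v').insert k v := by
  have hk1 : (d.insert k v).contains k' = true := by
    rw [PySem.Dict.contains_insert]; simp [hk']
  have hk2 : (d.insert k' v').contains k = true := by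
    rw [PySem.Dict.contains_insert]; simp [hk]
  apply PySem.Dict.ext
  rw [PySem.Dict.items_insert_of_contains _ v' hk1, PySem.Dict.items_insert_of_contains _ v hk,
      PySem.Dict.items_insert_of_contains _ v hk2, PySem.Dict.items_insert_of_contains _ v' hk',
      List.map_map, List.map_map]
  apply List.map_congr_left
  intro p _
  simp only [Function.comp]
  by_cases h1 : p.1 = k
  · have h2 : p.1 ≠ k' := by rw [h1]; exact hne
    simp [h1, hne, Ne.symm hne]
  · by_cases h2 : p.1 = k'
    · simp [h1, h2, hne, Ne.symm hne]
    · simp [h1, h2]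

lemma pv_NF_contains_ch (d : PySem.Dict String (List String)) (ch ch_i : String) (cl rl : List String) :
    (pvNF d ch ch_i cl rl).contains ch = true := by
  unfold pvNF
  rw [PySem.Dict.contains_insert]
  simp [PySem.Dict.contains_insert_self]

lemma pv_NF_getD_ch (d : PySem.Dict String (List String)) {ch ch_i : String} (hne : ch ≠ ch_i)
    (cl rl : List String) : (pvNF d ch ch_i cl rl).getD ch [] = cl := by
  unfold pvNF PySem.Dict.getD
  rw [PySem.Dict.get?_insert_of_ne _ rl hne, PySem.Dict.get?_insert_self]
  rfl

lemma pv_NF_getD_chi (d : PySem.Dict String (List String)) (ch ch_i : String)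
    (cl rl : List String) : (pvNF d ch ch_i cl rl).getD ch_i [] = rl := by
  unfold pvNF PySem.Dict.getD
  rw [PySem.Dict.get?_insert_self]
  rfl

lemma pv_NF_contains_chi' (d : PySem.Dict String (List String)) {ch ch_i : String} (cl : List String)
    (hchi : d.contains ch_i = true) :
    ((d.setdefault ch []).insert ch cl).contains ch_i = true := by
  rw [PySem.Dict.contains_insert, PySem.Dict.contains_setdefault]
  simp [hchi]

-- overwriting the ch entry of a normal form stays in normal form
lemma pv_NF_insert_ch (d : PySem.Dict String (List String)) {ch ch_i : String} (hne : ch ≠ ch_i)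
    (hchi : d.contains ch_i = true) (cl cl' rl : List String) :
    (pvNF d ch ch_i cl rl).insert ch cl' = pvNF d ch ch_i cl' rl := by
  unfold pvNF
  rw [pv_insert_comm _ ch_i ch rl cl' (Ne.symm hne) (pv_NF_contains_chi' d cl hchi)
        (PySem.Dict.contains_insert_self _ _ _),
      PySem.Dict.insert_insert_self]

lemma pv_NF_insert_chi (d : PySem.Dict String (List String)) (ch ch_i : String)
    (cl rl rl' : List String) :
    (pvNF d ch ch_i cl rl).insert ch_i rl' = pvNF d ch ch_i cl rl' := by
  unfold pvNF
  rw [PySem.Dict.insert_insert_self]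

lemma pv_body1_nf (d : PySem.Dict String (List String)) {ch_i ch : String} (hne : ch ≠ ch_i)
    (hchi : d.contains ch_i = true) (rl cl : List String) (item : String) :
    pvBody1 ch_i ch ch_i (pvNF d ch ch_i cl rl, 1) item =
      if pvFirstCharEq ch_i item then
        (pvNF d ch ch_i (cl ++ [PySem.Str.slice item (some 1) none ++ ch]) (pvRm rl item), 1)
      else (pvNF d ch ch_i cl rl, 1) := by
  unfold pvBody1
  by_cases hP : pvFirstCharEq ch_i item = true
  · simp only [beq_self_eq_true, hP, Bool.and_true, Bool.true_and, if_true,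
               pv_NF_contains_ch, PySem.Dict.modify, eq_self_iff_true]
    rw [pv_NF_getD_ch d hne cl rl]
    rw [pv_NF_insert_ch d hne hchi cl _ rl]
    rw [pv_NF_getD_chi, pv_NF_insert_chi]
  · simp [hP]

lemma pv_fold1_nf (d : PySem.Dict String (List String)) {ch_i ch : String} (hne : ch ≠ ch_i)
    (hchi : d.contains ch_i = true) :
    ∀ (todo : List String) (rl cl : List String),
      todo.foldl (pvBody1 ch_i ch ch_i) (pvNF d ch ch_i cl rl, 1) =
        (pvNF d ch ch_i
            (cl ++ (todo.filter (pvFirstCharEq ch_i)).map (fun p => PySem.Str.slice p (some 1) none ++ ch))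
            ((todo.filter (pvFirstCharEq ch_i)).foldl pvRm rl), 1) := by
  intro todo
  induction todo with
  | nil => intro rl cl; simp
  | cons x t ih =>
    intro rl cl
    simp only [List.foldl_cons, pv_body1_nf d hne hchi]
    by_cases hx : pvFirstCharEq ch_i x = true
    · rw [if_pos hx, ih]
      simp [List.filter_cons, hx, List.append_assoc]
    · rw [if_neg (by simpa using hx), ih]
      simp [List.filter_cons, hx]

lemma pv_fold1_entry (d : PySem.Dict String (List String)) {ch_i ch : String} (hne : ch ≠ ch_i)
    (hchi : d.contains ch_i = true) :
    ∀ todo : List String,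
      todo.foldl (pvBody1 ch_i ch ch_i) (d, 0) =
        if (todo.filter (pvFirstCharEq ch_i)).isEmpty then (d, (0 : Int))
        else (pvNF d ch ch_i
                (d.getD ch [] ++ (todo.filter (pvFirstCharEq ch_i)).map (fun p => PySem.Str.slice p (some 1) none ++ ch))
                ((todo.filter (pvFirstCharEq ch_i)).foldl pvRm (d.getD ch_i [])), 1) := by
  intro todo
  induction todo with
  | nil => simp
  | cons x t ih =>
    by_cases hx : pvFirstCharEq ch_i x = true
    · have hstep : pvBody1 ch_i ch ch_i (d, 0) x =
          (pvNF d ch ch_i (d.getD ch [] ++ [PySem.Str.slice x (some 1) none ++ ch])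
            (pvRm (d.getD ch_i []) x), 1) := by
        unfold pvBody1
        simp only [beq_self_eq_true, hx, Bool.and_true, Bool.true_and, if_true]
        have hE : (if PySem.Dict.contains d ch then d else d.insert ch []) = d.setdefault ch [] := by
          by_cases hc : d.contains ch = true
          · rw [if_pos hc, PySem.Dict.setdefault_of_contains d _ hc]
          · rw [if_neg (by simpa using hc),
                PySem.Dict.setdefault_of_not_contains d _ (by simpa using hc)]
        simp only [hE, PySem.Dict.modify]
        rw [PySem.Dict.getD_setdefault_self]
        have hgd : ((d.setdefault ch []).insert ch (d.getD ch [] ++ [PySem.Str.slice x (some 1) none ++ ch])).getD ch_i []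
            = d.getD ch_i [] := by
          unfold PySem.Dict.getD
          rw [PySem.Dict.get?_insert_of_ne _ _ (Ne.symm hne),
              PySem.Dict.get?_setdefault_of_ne _ _ (Ne.symm hne)]
        rw [hgd]
        rfl
      rw [List.foldl_cons, hstep, pv_fold1_nf d hne hchi t]
      simp [List.filter_cons, hx, List.append_assoc]
    · have hstep : pvBody1 ch_i ch ch_i (d, 0) x = (d, 0) := by
        unfold pvBody1
        simp [hx]
      simp only [List.foldl_cons, hstep, ih]
      simp [List.filter_cons, hx]

lemma pv_body2_nf (d : PySem.Dict String (List String)) {ch_i ch : String} (hne : ch ≠ ch_i)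
    (rl cl : List String) (item : String) :
    pvBody2 ch_i ch ch_i (pvNF d ch ch_i cl rl) item =
      if pvFirstCharEq ch_i item then pvNF d ch ch_i cl rl
      else pvNF d ch ch_i cl (pvRm (rl ++ [item ++ ch]) item) := by
  unfold pvBody2
  by_cases hP : pvFirstCharEq ch_i item = true
  · simp [hP]
  · have hP' : pvFirstCharEq ch_i item = false := by simpa using hP
    simp only [beq_self_eq_true, hP', Bool.true_and, Bool.not_false, if_true, Bool.and_self, if_pos]
    rw [if_pos (pv_NF_contains_ch d ch ch_i cl rl)]
    simp only [PySem.Dict.modify]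
    rw [pv_NF_getD_chi, pv_NF_insert_chi, pv_NF_getD_chi, pv_NF_insert_chi]
    simp [hP']

lemma pv_fold2_nf (d : PySem.Dict String (List String)) {ch_i ch : String} (hne : ch ≠ ch_i) :
    ∀ (todo rl cl : List String),
      todo.foldl (pvBody2 ch_i ch ch_i) (pvNF d ch ch_i cl rl) =
        pvNF d ch ch_i cl
          ((todo.filter (fun x => !pvFirstCharEq ch_i x)).foldl (fun l x => pvRm (l ++ [x ++ ch]) x) rl) := by
  intro todo
  induction todo with
  | nil => intro rl cl; simp
  | cons x t ih =>
    intro rl cl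
    simp only [List.foldl_cons, pv_body2_nf d hne]
    by_cases hx : pvFirstCharEq ch_i x = true
    · rw [if_pos hx, ih]
      simp [List.filter_cons, hx]
    · rw [if_neg (by simpa using hx), ih]
      simp [List.filter_cons, hx]

lemma pv_fold1_skip (ch_i ch key : String) (h : ch_i ≠ key) :
    ∀ (items : List String) (st : PySem.Dict String (List String) × Int),
      items.foldl (pvBody1 ch_i ch key) st = st := by
  intro items
  induction items with
  | nil => intro st; rfl
  | cons x t ih =>
    intro st
    have : pvBody1 ch_i ch key st x = st := by unfold pvBody1; simp [h]
    simp [List.foldl_cons, this, ih]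

lemma pv_fold2_skip (ch_i ch key : String) (h : ch_i ≠ key) :
    ∀ (items : List String) (st : PySem.Dict String (List String)),
      items.foldl (pvBody2 ch_i ch key) st = st := by
  intro items
  induction items with
  | nil => intro st; rfl
  | cons x t ih =>
    intro st
    have : pvBody2 ch_i ch key st x = st := by unfold pvBody2; simp [h]
    simp [List.foldl_cons, this, ih]

lemma pv_foldl_id {S : Type} (f : S → String → S) :
    ∀ (ks : List String) (init : S), (∀ s k, k ∈ ks → f s k = s) → ks.foldl f init = init := by
  intro ks
  induction ks with
  | nil => intro init _; rfl
  | cons k t ih =>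
    intro init h
    rw [List.foldl_cons, h init k (by simp), ih init (fun s k' hk' => h s k' (List.mem_cons_of_mem _ hk'))]

-- a fold over nodup keys whose body is the identity except at one key
lemma pv_outer_fold {S : Type} (f : S → String → S) (t : String) :
    ∀ (ks : List String) (init : S), ks.Nodup → (∀ s k, k ∈ ks → k ≠ t → f s k = s) →
      ks.foldl f init = if t ∈ ks then f init t else init := by
  intro ks
  induction ks with
  | nil => intro init _ _; simp
  | cons k rest ih =>
    intro init hnd h
    by_cases hk : k = t
    · subst hk
      have hnot : k ∉ rest := (List.nodup_cons.mp hnd).1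
      rw [List.foldl_cons,
          pv_foldl_id f rest (f init k)
            (fun s k' hk' => h s k' (List.mem_cons_of_mem _ hk') (fun he => hnot (he ▸ hk')))]
      simp
    · rw [List.foldl_cons, h init k (by simp) hk,
          ih init (List.nodup_cons.mp hnd).2 (fun s k' hk' => h s k' (List.mem_cons_of_mem _ hk'))]
      simp [Ne.symm hk, hk]

lemma pv_NF_modify_eps (d : PySem.Dict String (List String)) {ch_i ch : String} (hne : ch ≠ ch_i)
    (hchi : d.contains ch_i = true) (cl rl : List String) :
    (pvNF d ch ch_i cl rl).modify ch [] (fun l => l ++ ["\u03b5"]) = pvNF d ch ch_i (cl ++ ["\u03b5"]) rl := by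
  simp only [PySem.Dict.modify]
  rw [pv_NF_getD_ch d hne, pv_NF_insert_ch d hne hchi]


-- ===== VERDICT (by name: the statement is the Claim_ definition above) =====
theorem clean_direct_recursion_spec : Claim_equal_clean_direct_recursion := by
  intro ch_i grammer new_vn _ hpre
  unfold Spec_clean_direct_recursion
  have hnd : (PySem.Dict.mk grammer : PySem.Dict String (List String)).keys.Nodup := by
    simpa [PySem.Dict.keys] using hpre.1
  have hne : ch_i ++ "'" ≠ ch_i := pv_append_quote_ne ch_i
  cases h : (PySem.Dict.mk grammer : PySem.Dict String (List String)).get? ch_i with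
  | none =>
    have hmem : ch_i ∉ (PySem.Dict.mk grammer : PySem.Dict String (List String)).keys :=
      (PySem.Dict.get?_eq_none_iff_not_mem_keys _ _).mp h
    simp only [clean_direct_recursion, clean_direct_recursion_alt, h]
    rw [pv_outer_fold _ ch_i _ _ hnd
        (fun s k hk hkne => pv_fold1_skip ch_i (ch_i ++ "'") k (Ne.symm hkne) _ s)]
    rw [if_neg hmem]
    rfl
  | some prods =>
    have hchi : (PySem.Dict.mk grammer : PySem.Dict String (List String)).contains ch_i = true := by
      rw [PySem.Dict.contains_eq_isSome_get?, h]; rfl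
    have hmem : ch_i ∈ (PySem.Dict.mk grammer : PySem.Dict String (List String)).keys :=
      (PySem.Dict.contains_iff_mem_keys _ _).mp hchi
    have hget : (PySem.Dict.mk grammer : PySem.Dict String (List String)).getD ch_i [] = prods :=
      PySem.Dict.getD_of_get?_eq_some _ [] h
    simp only [clean_direct_recursion, clean_direct_recursion_alt, h]
    rw [pv_outer_fold _ ch_i _ _ hnd
        (fun s k hk hkne => pv_fold1_skip ch_i (ch_i ++ "'") k (Ne.symm hkne) _ s)]
    rw [if_pos hmem, hget, pv_fold1_entry _ hne hchi]
    by_cases hrec : (prods.filter (pvFirstCharEq ch_i)).isEmpty = true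
    · rw [if_pos hrec]
      simp [hrec]
    · rw [if_neg hrec]
      simp only [show ((1 : Int) == 0) = false from rfl, Bool.false_eq_true, if_false, if_neg]
      rw [pv_outer_fold _ ch_i _ _ hnd
          (fun s k hk hkne => pv_fold2_skip ch_i (ch_i ++ "'") k (Ne.symm hkne) _ s)]
      rw [if_pos hmem, hget, pv_fold2_nf _ hne, pv_foldl_rm_filter]
      have hrm2 : (prods.filter (fun x => !pvFirstCharEq ch_i x)).foldl
            (fun l x => pvRm (l ++ [x ++ (ch_i ++ "'")]) x)
            (prods.filter (fun x => !pvFirstCharEq ch_i x)) =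
          (prods.filter (fun x => !pvFirstCharEq ch_i x)).map (· ++ (ch_i ++ "'")) := by
        simpa only [List.append_nil, List.nil_append] using
          pv_foldl_rm_append (ch_i ++ "'") (prods.filter (fun x => !pvFirstCharEq ch_i x)) []
      rw [hrm2, pv_NF_modify_eps _ hne hchi, if_neg hrec]
      unfold pvNF
      rw [PySem.Dict.getD_setdefault_self]
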